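-- pv_equiv track=rewrite | github.com/botwa2000/Bonistock | scripts/discover.py | derive_region
-- ===== SOURCE A (Python) =====
-- def derive_region(exchange: str) -> str:
--     ex = (exchange or "").upper()
--     if any(k in ex for k in ["NYSE", "NASDAQ", "AMEX", "NMS", "NYQ", "ASE", "NAS"]):
--         return "us"
--     if any(k in ex for k in [
--         "XETRA", "EURONEXT", "LONDON", "COPENHAGEN", "AMSTERDAM", "PARIS",
--         "MILAN", "ZURICH", "SIX", "GER", "PAR", "AMS", "LSE", "MIL", "EBS",
--     ]):
--         return "europe"
--     return "em"
-- ===== SOURCE B (Python) =====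
-- _US = ("NYSE", "NASDAQ", "AMEX", "NMS", "NYQ", "ASE", "NAS")
-- _EU = ("XETRA", "EURONEXT", "LONDON", "COPENHAGEN", "AMSTERDAM", "PARIS",
--        "MILAN", "ZURICH", "SIX", "GER", "PAR", "AMS", "LSE", "MIL", "EBS")
--
--
-- def derive_region(exchange: str) -> str:
--     # Single left-to-right scan over positions: at each position test whether a
--     # US / Europe keyword starts there, accumulating two flags; decide at the end.
--     ex = (exchange or "").upper()
--     found_us = False
--     found_eu = False
--     for i in range(len(ex)):
--         if ex.startswith(_US, i):
--             found_us = True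
--         if ex.startswith(_EU, i):
--             found_eu = True
--     if found_us:
--         return "us"
--     if found_eu:
--         return "europe"
--     return "em"
-- ===== Notes on version B (the rewrite author's own statement) =====
-- stated objective: alternative
-- what changed: Replaces A's keyword-driven membership tests (any(k in ex) per region list) by a single position-driven scan: one pass over the string's positions testing tuple-startswith at each suffix while accumulating found_us/found_eu flags, deciding the region after the scan.
import Mathlib
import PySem

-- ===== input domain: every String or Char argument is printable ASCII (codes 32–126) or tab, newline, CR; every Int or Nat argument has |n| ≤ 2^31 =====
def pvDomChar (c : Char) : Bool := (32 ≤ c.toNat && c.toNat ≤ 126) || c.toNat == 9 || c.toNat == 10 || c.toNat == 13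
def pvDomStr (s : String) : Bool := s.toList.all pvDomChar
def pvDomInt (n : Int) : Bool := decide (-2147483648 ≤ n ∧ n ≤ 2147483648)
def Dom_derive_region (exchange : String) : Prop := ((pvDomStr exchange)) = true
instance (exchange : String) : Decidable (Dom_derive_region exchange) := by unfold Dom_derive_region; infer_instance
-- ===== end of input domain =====

-- B replaces A's keyword-driven membership tests by a single position scan with two
-- accumulator flags; same cost, different traversal. Python's `(exchange or "")` is
-- the identity on strings, so both ports apply .upper() directly.

-- ===== PORT A =====
def derive_region (exchange : String) : String :=
  let ex := PySem.Str.upper exchange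
  if ["NYSE", "NASDAQ", "AMEX", "NMS", "NYQ", "ASE", "NAS"].any
      (fun k => PySem.Str.isIn k ex) then "us"
  else if ["XETRA", "EURONEXT", "LONDON", "COPENHAGEN", "AMSTERDAM", "PARIS",
           "MILAN", "ZURICH", "SIX", "GER", "PAR", "AMS", "LSE", "MIL", "EBS"].any
      (fun k => PySem.Str.isIn k ex) then "europe"
  else "em"

-- ===== PORT B =====
def usKeys : List (List Char) :=
  ["NYSE".toList, "NASDAQ".toList, "AMEX".toList, "NMS".toList, "NYQ".toList,
   "ASE".toList, "NAS".toList]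

def euKeys : List (List Char) :=
  ["XETRA".toList, "EURONEXT".toList, "LONDON".toList, "COPENHAGEN".toList,
   "AMSTERDAM".toList, "PARIS".toList, "MILAN".toList, "ZURICH".toList,
   "SIX".toList, "GER".toList, "PAR".toList, "AMS".toList, "LSE".toList,
   "MIL".toList, "EBS".toList]

-- tail.startswith(tuple): does any keyword begin at this position?
def startsAny (keys : List (List Char)) (tail : List Char) : Bool :=
  keys.any (fun k => PySem.Chars.startswith tail k)

-- the `for i in range(len(ex))` loop: walk the suffixes, accumulating the two flags
def scanB : List Char → Bool → Bool → Bool × Bool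
  | [], fu, fe => (fu, fe)
  | c :: rest, fu, fe =>
      scanB rest (if startsAny usKeys (c :: rest) then true else fu)
                 (if startsAny euKeys (c :: rest) then true else fe)

def derive_region_alt (exchange : String) : String :=
  let ex := (PySem.Str.upper exchange).toList
  let r := scanB ex false false
  if r.1 then "us" else if r.2 then "europe" else "em"

-- ===== PRECONDITION & SPEC =====
def Spec_derive_region (exchange : String) (out : String) : Prop := out = derive_region_alt exchange
instance (exchange : String) (out : String) : Decidable (Spec_derive_region exchange out) := by unfold Spec_derive_region; infer_instance

-- ===== CLAIM (what is proved, stated in full; the proofs are below) =====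
def Claim_equal_derive_region : Prop := ∀ (exchange : String), Dom_derive_region exchange → Spec_derive_region exchange (derive_region exchange)

-- ===== LEMMAS AND PROOFS =====

-- "some keyword starts at some position of l", in the same recursion shape as scanB
def existsKey (keys : List (List Char)) : List Char → Bool
  | [] => false
  | c :: rest => startsAny keys (c :: rest) || existsKey keys rest

theorem scanB_eq (l : List Char) (fu fe : Bool) :
    scanB l fu fe = (fu || existsKey usKeys l, fe || existsKey euKeys l) := by
  induction l generalizing fu fe with
  | nil => simp [scanB, existsKey]
  | cons c rest ih =>
      simp only [scanB, existsKey, ih]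
      refine Prod.ext ?_ ?_ <;> simp [Bool.or_comm, Bool.or_left_comm]

theorem startsAny_iff (keys : List (List Char)) (l : List Char) :
    startsAny keys l = true ↔ ∃ k ∈ keys, k <+: l := by
  simp [startsAny, List.any_eq_true, PySem.Chars.startswith_iff]

theorem existsKey_iff (keys : List (List Char)) (h : ∀ k ∈ keys, k ≠ []) (l : List Char) :
    existsKey keys l = true ↔ ∃ k ∈ keys, ∃ j, k <+: l.drop j := by
  induction l with
  | nil =>
      simp only [existsKey, List.drop_nil]
      constructor
      · intro hf; cases hf
      · rintro ⟨k, hk, j, hp⟩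
        exact absurd (List.prefix_nil.mp hp) (h k hk)
  | cons c rest ih =>
      simp only [existsKey, Bool.or_eq_true, ih, startsAny_iff]
      constructor
      · rintro (⟨k, hk, hp⟩ | ⟨k, hk, j, hp⟩)
        · exact ⟨k, hk, 0, by simpa using hp⟩
        · exact ⟨k, hk, j + 1, by simpa using hp⟩
      · rintro ⟨k, hk, j, hp⟩
        cases j with
        | zero => exact Or.inl ⟨k, hk, by simpa using hp⟩
        | succ j => exact Or.inr ⟨k, hk, j, by simpa using hp⟩

theorem anyIsIn_eq_existsKey (keysS : List String) (keys : List (List Char))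
    (hmap : keys = keysS.map String.toList) (h : ∀ k ∈ keys, k ≠ []) (ex : String) :
    keysS.any (fun k => PySem.Str.isIn k ex) = existsKey keys ex.toList := by
  rw [Bool.eq_iff_iff]
  rw [existsKey_iff keys h ex.toList]
  simp only [List.any_eq_true, PySem.Str.isIn_iff_infix]
  subst hmap
  constructor
  · rintro ⟨k, hk, hinf⟩
    obtain ⟨j, hp⟩ := (PySem.Chars.exists_prefix_drop_iff_isIn k.toList ex.toList).mpr
      ((PySem.Chars.isIn_iff_infix k.toList ex.toList).mpr hinf)
    exact ⟨k.toList, List.mem_map_of_mem hk, j, hp⟩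
  · rintro ⟨k, hk, j, hp⟩
    obtain ⟨s, hs, rfl⟩ := List.mem_map.mp hk
    refine ⟨s, hs, ?_⟩
    exact (PySem.Chars.isIn_iff_infix s.toList ex.toList).mp
      ((PySem.Chars.exists_prefix_drop_iff_isIn s.toList ex.toList).mp ⟨j, hp⟩)

-- ===== VERDICT (by name: the statement is the Claim_ definition above) =====
theorem derive_region_spec : Claim_equal_derive_region := by
  intro exchange _
  unfold Spec_derive_region derive_region derive_region_alt
  simp only []
  rw [scanB_eq]
  rw [anyIsIn_eq_existsKey _ usKeys rfl (by decide) (PySem.Str.upper exchange),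
      anyIsIn_eq_existsKey _ euKeys rfl (by decide) (PySem.Str.upper exchange)]
  simp
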